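-- pv_equiv track=rewrite | github.com/correia55/PollMeBot | poll_me_bot.py | parse_command_parameters
-- ===== SOURCE A (Python) =====
-- def parse_command_parameters(command):
--     """
--     Parse the command, separating commands by spaces, ignoring spaces within quotation marks.
--
--     :param command: the unparsed command.
--     :return: the list of parameters.
--     """
--
--     rem_qm = command.split('"')
--
--     params = []
--
--     for i in range(len(rem_qm)):
--         if rem_qm[i] == '':
--             continue
--
--         # If it's even
--         if i % 2 == 0:
--             for p in rem_qm[i].split(' '):
--                 if p != '':
--                     params.append(p)
--         # If it's odd
--         else:
--             params.append('"%s"' % rem_qm[i])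
--
--     return params
-- ===== SOURCE B (Python) =====
-- def parse_command_parameters(command):
--     """Single left-to-right scan with an in_quote flag and a buffer (one pass, no split)."""
--
--     params = []
--     buf = ''
--     in_quote = False
--
--     for c in command:
--         if c == '"':
--             if buf != '':
--                 params.append('"%s"' % buf if in_quote else buf)
--             buf = ''
--             in_quote = not in_quote
--         elif c == ' ' and not in_quote:
--             if buf != '':
--                 params.append(buf)
--             buf = ''
--         else:
--             buf += c
--
--     if buf != '':
--         params.append('"%s"' % buf if in_quote else buf)
--
--     return params
-- ===== Notes on version B (the rewrite author's own statement) =====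
-- stated objective: simpler
-- what changed: Replaces the split-on-quotes list plus index-parity dispatch and inner space-split loop with a single left-to-right character scan maintaining an in_quote flag and a buffer.
import Mathlib
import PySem

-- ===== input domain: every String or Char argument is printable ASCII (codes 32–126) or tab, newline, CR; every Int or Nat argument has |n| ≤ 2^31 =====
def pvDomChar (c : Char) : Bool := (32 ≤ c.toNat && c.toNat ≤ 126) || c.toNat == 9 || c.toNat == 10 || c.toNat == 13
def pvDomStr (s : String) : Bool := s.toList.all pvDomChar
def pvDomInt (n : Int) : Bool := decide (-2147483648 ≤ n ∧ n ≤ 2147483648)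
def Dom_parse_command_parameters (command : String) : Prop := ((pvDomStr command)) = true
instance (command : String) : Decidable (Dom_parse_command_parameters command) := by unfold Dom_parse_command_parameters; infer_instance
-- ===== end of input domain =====

-- B replaces A's split-on-quotes + index-parity + inner space-split with one character scan
-- carrying an in_quote flag and a buffer (objective: simpler, same behaviour, same O(n) cost).

-- ===== PORT A =====
def parse_command_parameters (command : String) : List String :=
  let rem_qm := PySem.Chars.splitOn command.toList ['"']
  (PySem.List.enumerate rem_qm).foldl
    (fun params iseg =>
      if iseg.2 = [] then params
      else if PySem.Int.mod iseg.1 2 = 0 then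
        (PySem.Chars.splitOn iseg.2 [' ']).foldl
          (fun params p => if p ≠ [] then params ++ [String.ofList p] else params) params
      else params ++ [String.ofList ('"' :: iseg.2 ++ ['"'])])
    []

-- ===== PORT B =====
-- flush: "if buf != '': params.append('\"%s\"' % buf if in_quote else buf)"
def pvFlush (q : Bool) (buf : List Char) : List String :=
  if buf = [] then [] else [String.ofList (if q then '"' :: buf ++ ['"'] else buf)]

def pvStep (st : Bool × List Char × List String) (c : Char) : Bool × List Char × List String :=
  if c = '"' then (!st.1, [], st.2.2 ++ pvFlush st.1 st.2.1)
  else if c = ' ' ∧ st.1 = false then (st.1, [], st.2.2 ++ pvFlush false st.2.1)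
  else (st.1, st.2.1 ++ [c], st.2.2)

def parse_command_parameters_alt (command : String) : List String :=
  let st := command.toList.foldl pvStep (false, [], [])
  st.2.2 ++ pvFlush st.1 st.2.1

-- ===== PRECONDITION & SPEC =====
def Spec_parse_command_parameters (command : String) (out : List String) : Prop := out = parse_command_parameters_alt command
instance (command : String) (out : List String) : Decidable (Spec_parse_command_parameters command out) := by unfold Spec_parse_command_parameters; infer_instance

-- ===== CLAIM (what is proved, stated in full; the proofs are below) =====
def Claim_equal_parse_command_parameters : Prop := ∀ (command : String), Dom_parse_command_parameters command → Spec_parse_command_parameters command (parse_command_parameters command)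

-- ===== LEMMAS AND PROOFS =====

-- head/tail form of splitting on a single separator character
def splitC (sep : Char) : List Char → List Char × List (List Char)
  | [] => ([], [])
  | c :: l =>
    if c = sep then ([], (splitC sep l).1 :: (splitC sep l).2)
    else (c :: (splitC sep l).1, (splitC sep l).2)


-- how A processes the list of quote-split segments, with the parity flag explicit
def procA : Bool → List (List Char) → List String
  | _, [] => []
  | even, s :: rest =>
    (if s = [] then []
     else if even then
       (((splitC ' ' s).1 :: (splitC ' ' s).2).filter (· ≠ [])).map String.ofList
     else [String.ofList ('"' :: s ++ ['"'])]) ++ procA (!even) rest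

theorem splitOn_go_spec (sep : Char) :
    ∀ (fuel : Nat) (l : List Char), l.length ≤ fuel → ∀ (cur : List Char) (acc : List (List Char)),
    PySem.Chars.splitOn.go [sep] fuel l cur acc
      = acc.reverse ++ ((cur.reverse ++ (splitC sep l).1) :: (splitC sep l).2) := by
  intro fuel
  induction fuel with
  | zero =>
      intro l hl cur acc
      have : l = [] := List.length_eq_zero_iff.mp (Nat.le_zero.mp hl)
      subst this
      simp [PySem.Chars.splitOn.go, splitC]
  | succ fuel ih =>
      intro l hl cur acc
      cases l with
      | nil => simp [PySem.Chars.splitOn.go, splitC]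
      | cons c rest =>
          rw [PySem.Chars.splitOn.go]
          by_cases hc : c = sep
          · subst hc
            have hpre : List.isPrefixOf [c] (c :: rest) = true := by
              simp [List.isPrefixOf]
            simp only [hpre, if_pos]
            have hdrop : List.drop [c].length (c :: rest) = rest := by simp
            rw [hdrop, ih rest (by simpa using Nat.le_of_succ_le_succ hl)]
            simp [splitC]
          · have hpre : List.isPrefixOf [sep] (c :: rest) = false := by
              simp only [List.isPrefixOf, Bool.and_eq_false_iff]
              left
              simp only [beq_eq_false_iff_ne, ne_eq]
              exact fun h => hc h.symm
            simp only [hpre, Bool.false_eq_true, if_neg, not_false_iff]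
            rw [ih rest (by simpa using Nat.le_of_succ_le_succ hl)]
            simp [splitC, hc]

theorem splitOn_eq_splitC (sep : Char) (l : List Char) :
    PySem.Chars.splitOn l [sep] = (splitC sep l).1 :: (splitC sep l).2 := by
  unfold PySem.Chars.splitOn
  rw [splitOn_go_spec sep (l.length + 1) l (by omega)]
  simp

-- a separator-free prefix sticks to the head segment
theorem splitC_append (sep : Char) (b l : List Char) (hb : sep ∉ b) :
    splitC sep (b ++ l) = (b ++ (splitC sep l).1, (splitC sep l).2) := by
  induction b with
  | nil => simp
  | cons x xs ih =>
      have hx : x ≠ sep := fun h => hb (h ▸ List.mem_cons_self)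
      have hxs : sep ∉ xs := fun h => hb (List.mem_cons_of_mem _ h)
      simp [splitC, hx, ih hxs]

theorem splitC_no_sep (sep : Char) (l : List Char) (h : sep ∉ l) :
    splitC sep l = (l, []) := by
  have := splitC_append sep l [] h
  simpa [splitC] using this

-- the two head shapes of procA
theorem procA_cons_true (s : List Char) (rest : List (List Char)) :
    procA true (s :: rest)
      = ((((splitC ' ' s).1 :: (splitC ' ' s).2).filter (· ≠ [])).map String.ofList)
          ++ procA false rest := by
  by_cases hs : s = []
  · subst hs; simp [procA, splitC]
  · simp [procA, hs]

theorem procA_cons_false (s : List Char) (rest : List (List Char)) :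
    procA false (s :: rest)
      = (if s = [] then [] else [String.ofList ('"' :: s ++ ['"'])]) ++ procA true rest := by
  by_cases hs : s = []
  · subst hs; simp [procA]
  · simp [procA, hs]

-- A's enumerate-fold computes procA
theorem foldA_spec :
    ∀ (segs : List (List Char)) (s : Int) (params : List String),
    (PySem.List.enumerate segs s).foldl
      (fun params iseg =>
        if iseg.2 = [] then params
        else if PySem.Int.mod iseg.1 2 = 0 then
          (PySem.Chars.splitOn iseg.2 [' ']).foldl
            (fun params p => if p ≠ [] then params ++ [String.ofList p] else params) params
        else params ++ [String.ofList ('"' :: iseg.2 ++ ['"'])])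
      params
      = params ++ procA (decide (PySem.Int.mod s 2 = 0)) segs := by
  intro segs
  induction segs with
  | nil => intro s params; simp [procA]
  | cons seg rest ih =>
      intro s params
      rw [PySem.List.enumerate_cons, List.foldl_cons, ih (s + 1)]
      have hmod : PySem.Int.mod s 2 = s % 2 := PySem.Int.mod_eq_emod_of_pos (by omega)
      have hmod1 : PySem.Int.mod (s + 1) 2 = (s + 1) % 2 := PySem.Int.mod_eq_emod_of_pos (by omega)
      have hpar : (decide (PySem.Int.mod (s + 1) 2 = 0)) = !(decide (PySem.Int.mod s 2 = 0)) := by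
        rw [hmod, hmod1]
        by_cases h : s % 2 = 0
        · have : (s + 1) % 2 = 1 := by omega
          simp [h, this]
        · have : (s + 1) % 2 = 0 := by omega
          simp [h, this]
      rw [hpar]
      by_cases he : PySem.Int.mod s 2 = 0
      · have hfold := PySem.List.foldl_append_if (fun p : List Char => decide (p ≠ []))
          String.ofList ((splitC ' ' seg).1 :: (splitC ' ' seg).2) params
        simp only [decide_eq_true_eq] at hfold
        by_cases hseg : seg = []
        · subst hseg
          simp [procA]
        · simp only [hseg, if_neg, he, if_pos, decide_true, not_false_iff]
          rw [splitOn_eq_splitC, hfold, procA_cons_true]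
          simp
      · by_cases hseg : seg = []
        · subst hseg
          simp [procA]
        · simp only [hseg, if_neg, he, not_false_iff, decide_false]
          rw [procA_cons_false]
          simp [hseg]

-- B's scan, started on any consistent intermediate state, computes procA of the quote-split of the rest
theorem scanB_spec :
    ∀ (cs : List Char) (q : Bool) (buf : List Char) (acc : List String),
    '"' ∉ buf → (q = false → ' ' ∉ buf) →
    (let st := cs.foldl pvStep (q, buf, acc)
     st.2.2 ++ pvFlush st.1 st.2.1)
      = acc ++ procA (!q) ((splitC '"' (buf ++ cs)).1 :: (splitC '"' (buf ++ cs)).2) := by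
  intro cs
  induction cs with
  | nil =>
      intro q buf acc hq hsp
      rw [List.append_nil, splitC_no_sep '"' buf hq]
      simp only [List.foldl_nil]
      cases q with
      | false =>
          rw [Bool.not_false, procA_cons_true, splitC_no_sep ' ' buf (hsp rfl)]
          by_cases hb : buf = [] <;> simp [pvFlush, hb, procA]
      | true =>
          rw [Bool.not_true, procA_cons_false]
          by_cases hb : buf = [] <;> simp [pvFlush, hb, procA]
  | cons c cs ih =>
      intro q buf acc hq hsp
      by_cases hc : c = '"'
      · subst hc
        have hstep : pvStep (q, buf, acc) '"' = (!q, [], acc ++ pvFlush q buf) := by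
          simp [pvStep]
        have h4 : splitC '"' (buf ++ '"' :: cs)
            = (buf, (splitC '"' cs).1 :: (splitC '"' cs).2) := by
          rw [splitC_append '"' buf _ hq]
          simp [splitC]
        rw [List.foldl_cons, hstep,
          ih (!q) [] (acc ++ pvFlush q buf) (by simp) (by simp)]
        simp only [h4, List.nil_append, Bool.not_not]
        cases q with
        | false =>
            rw [Bool.not_false, procA_cons_true, splitC_no_sep ' ' buf (hsp rfl)]
            by_cases hb : buf = [] <;> simp [pvFlush, hb]
        | true =>
            rw [Bool.not_true, procA_cons_false]
            by_cases hb : buf = [] <;> simp [pvFlush, hb]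
      · by_cases hcs : c = ' ' ∧ q = false
        · obtain ⟨hc', hq'⟩ := hcs
          subst hc'; subst hq'
          have hstep : pvStep (false, buf, acc) ' ' = (false, [], acc ++ pvFlush false buf) := by
            simp [pvStep, hc]
          have h5 : splitC '"' (buf ++ ' ' :: cs)
              = (buf ++ ' ' :: (splitC '"' cs).1, (splitC '"' cs).2) := by
            rw [splitC_append '"' buf _ hq]
            simp [splitC, hc]
          have h6 : splitC ' ' (buf ++ ' ' :: (splitC '"' cs).1)
              = (buf, (splitC ' ' (splitC '"' cs).1).1 :: (splitC ' ' (splitC '"' cs).1).2) := by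
            rw [splitC_append ' ' buf _ (hsp rfl)]
            simp [splitC]
          rw [List.foldl_cons, hstep,
            ih false [] (acc ++ pvFlush false buf) (by simp) (by simp)]
          simp only [h5, List.nil_append, Bool.not_false]
          rw [procA_cons_true, procA_cons_true]
          simp only [h6, List.filter_cons]
          by_cases hb : buf = [] <;> simp [pvFlush, hb]
        · have hstep : pvStep (q, buf, acc) c = (q, buf ++ [c], acc) := by
            simp [pvStep, hc, hcs]
          rw [List.foldl_cons, hstep,
            ih q (buf ++ [c]) acc
              (by
                simp only [List.mem_append, List.mem_singleton]
                rintro (h1 | h1)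
                · exact hq h1
                · exact hc h1.symm)
              (by
                intro h0
                simp only [List.mem_append, List.mem_singleton]
                rintro (h1 | h1)
                · exact hsp h0 h1
                · exact hcs ⟨h1.symm, h0⟩)]
          simp

-- ===== VERDICT (by name: the statement is the Claim_ definition above) =====
theorem parse_command_parameters_spec : Claim_equal_parse_command_parameters := by
  intro command _
  unfold Spec_parse_command_parameters parse_command_parameters parse_command_parameters_alt
  rw [splitOn_eq_splitC, foldA_spec _ 0]
  have := scanB_spec command.toList false [] [] (by simp) (by simp)
  simp only [List.nil_append] at this ⊢
  exact this.symm
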